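-- pv_equiv track=rewrite | github.com/CirbuildProject/Cirbuild-Spec2RTL | spec2rtl/pipeline.py | _ensure_single_toppragma
-- ===== SOURCE A (Python) =====
-- def _ensure_single_toppragma(code: str) -> str:
--     """Ensure only one #pragma hls_top remains (keeps first)."""
--     lines = code.split("\n")
--     final_lines = []
--     found_top = False
--
--     for line in lines:
--         if "#pragma hls_top" in line:
--             if not found_top:
--                 final_lines.append(line)
--                 found_top = True
--             # Skip subsequent #pragma hls_top
--             continue
--         final_lines.append(line)
--
--     return "\n".join(final_lines)
-- ===== SOURCE B (Python) =====
-- def _ensure_single_toppragma(code: str) -> str: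
--     """Ensure only one #pragma hls_top remains (keeps first)."""
--     lines = code.split("\n")
--     first = next((i for i, line in enumerate(lines) if "#pragma hls_top" in line), None)
--     return "\n".join(
--         line for i, line in enumerate(lines)
--         if "#pragma hls_top" not in line or i == first
--     )
-- ===== Notes on version B (the rewrite author's own statement) =====
-- stated objective: idiomatic
-- what changed: Replaces the running found_top flag and accumulator loop with a locate-then-filter shape: one scan precomputes the index of the first pragma line, then a single comprehension keeps non-pragma lines plus that index.
import Mathlib
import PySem

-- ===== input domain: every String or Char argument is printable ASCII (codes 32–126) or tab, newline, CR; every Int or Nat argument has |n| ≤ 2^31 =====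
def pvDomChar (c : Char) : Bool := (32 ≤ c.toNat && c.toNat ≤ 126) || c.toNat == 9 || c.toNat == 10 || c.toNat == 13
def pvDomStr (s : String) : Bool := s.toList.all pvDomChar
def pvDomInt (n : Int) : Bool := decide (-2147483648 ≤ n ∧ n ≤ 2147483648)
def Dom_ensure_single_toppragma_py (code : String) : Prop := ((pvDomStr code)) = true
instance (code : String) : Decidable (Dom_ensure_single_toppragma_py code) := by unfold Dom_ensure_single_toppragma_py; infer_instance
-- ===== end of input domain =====

-- B replaces A's running found_top flag with a precomputed first-pragma index and a
-- single filtering comprehension (locate-then-filter); objective: idiomatic, same cost.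

-- ===== PORT A =====
-- the loop: for line in lines, with accumulator final_lines and flag found_top
def pvALoop : List String → List String → Bool → List String
  | [], finalLines, _ => finalLines
  | line :: rest, finalLines, foundTop =>
    if PySem.Str.isIn "#pragma hls_top" line then
      if !foundTop then pvALoop rest (finalLines ++ [line]) true
      else pvALoop rest finalLines foundTop
    else pvALoop rest (finalLines ++ [line]) foundTop

def ensure_single_toppragma_py (code : String) : String :=
  -- split? is Python-exact; the separator "\n" is nonempty so it is always `some`
  let lines := (PySem.Str.split? code "\n").getD []
  PySem.Str.join "\n" (pvALoop lines [] false)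

-- ===== PORT B =====
-- next((i for i, line in enumerate(lines) if "#pragma hls_top" in line), None)
def pvFirstIdx : List (Int × String) → Option Int
  | [] => none
  | (i, line) :: rest =>
    if PySem.Str.isIn "#pragma hls_top" line then some i else pvFirstIdx rest

def ensure_single_toppragma_py_alt (code : String) : String :=
  let lines := (PySem.Str.split? code "\n").getD []
  let first := pvFirstIdx (PySem.List.enumerate lines)
  PySem.Str.join "\n"
    (((PySem.List.enumerate lines).filter
        (fun q => !PySem.Str.isIn "#pragma hls_top" q.2 || (some q.1 == first))).map
      (fun q => q.2))

-- ===== PRECONDITION & SPEC =====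
def Spec_ensure_single_toppragma_py (code : String) (out : String) : Prop := out = ensure_single_toppragma_py_alt code
instance (code : String) (out : String) : Decidable (Spec_ensure_single_toppragma_py code out) := by unfold Spec_ensure_single_toppragma_py; infer_instance

-- ===== CLAIM (what is proved, stated in full; the proofs are below) =====
def Claim_equal_ensure_single_toppragma_py : Prop := ∀ (code : String), Dom_ensure_single_toppragma_py code → Spec_ensure_single_toppragma_py code (ensure_single_toppragma_py code)

-- ===== LEMMAS AND PROOFS =====

-- the canonical "keep the first pragma line, drop the rest" function both ports compute
def pvKeepFirst : List String → List String
  | [] => []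
  | l :: rest =>
    if PySem.Str.isIn "#pragma hls_top" l then
      l :: rest.filter (fun x => !PySem.Str.isIn "#pragma hls_top" x)
    else l :: pvKeepFirst rest

lemma pvALoop_true (lines : List String) : ∀ acc,
    pvALoop lines acc true = acc ++ lines.filter (fun x => !PySem.Str.isIn "#pragma hls_top" x) := by
  induction lines with
  | nil => intro acc; simp [pvALoop]
  | cons l rest ih =>
    intro acc
    simp only [pvALoop, List.filter_cons]
    by_cases h : PySem.Str.isIn "#pragma hls_top" l = true
    · simp only [h, Bool.not_true, Bool.false_eq_true, if_false, if_true]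
      exact ih acc
    · simp only [Bool.not_eq_true] at h
      simp only [h, Bool.not_false, Bool.false_eq_true, if_false, if_true]
      rw [ih (acc ++ [l])]
      simp

lemma pvALoop_false (lines : List String) : ∀ acc,
    pvALoop lines acc false = acc ++ pvKeepFirst lines := by
  induction lines with
  | nil => intro acc; simp [pvALoop, pvKeepFirst]
  | cons l rest ih =>
    intro acc
    simp only [pvALoop, pvKeepFirst]
    by_cases h : PySem.Str.isIn "#pragma hls_top" l = true
    · simp only [h, Bool.not_false, if_true]
      rw [pvALoop_true rest (acc ++ [l])]
      simp
    · simp only [Bool.not_eq_true] at h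
      simp only [h, Bool.not_false, Bool.false_eq_true, if_false, if_true]
      rw [ih (acc ++ [l])]
      simp

lemma pvEnumerate_cons (l : String) (rest : List String) (k : Int) :
    PySem.List.enumerate (l :: rest) k = (k, l) :: PySem.List.enumerate rest (k + 1) := by
  simp [PySem.List.enumerate]

lemma pvEnumerate_idx_ge (rest : List String) : ∀ (m : Int) q,
    q ∈ PySem.List.enumerate rest m → m ≤ q.1 := by
  induction rest with
  | nil => intro m q h; simp [PySem.List.enumerate] at h
  | cons l t ih =>
    intro m q hmem
    rw [pvEnumerate_cons] at hmem
    rcases List.mem_cons.mp hmem with h1 | h1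
    · simp [h1]
    · have := ih (m + 1) q h1; omega

lemma pvFilter_map_snd (rest : List String) : ∀ (m : Int),
    ((PySem.List.enumerate rest m).filter
        (fun q => !PySem.Str.isIn "#pragma hls_top" q.2)).map (fun q => q.2)
      = rest.filter (fun x => !PySem.Str.isIn "#pragma hls_top" x) := by
  induction rest with
  | nil => intro m; simp [PySem.List.enumerate]
  | cons l t ih =>
    intro m
    rw [pvEnumerate_cons]
    simp only [List.filter_cons]
    by_cases h : PySem.Str.isIn "#pragma hls_top" l = true
    · simp only [h, Bool.not_true, Bool.false_eq_true, if_false]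
      exact ih (m + 1)
    · simp only [Bool.not_eq_true] at h
      simp only [h, Bool.not_false, if_true, List.map_cons]
      rw [ih (m + 1)]

lemma pvB_main (lines : List String) : ∀ (k : Int),
    ((PySem.List.enumerate lines k).filter
        (fun q => !PySem.Str.isIn "#pragma hls_top" q.2
          || (some q.1 == pvFirstIdx (PySem.List.enumerate lines k)))).map (fun q => q.2)
      = pvKeepFirst lines := by
  induction lines with
  | nil => intro k; simp [PySem.List.enumerate, pvKeepFirst]
  | cons l rest ih =>
    intro k
    rw [pvEnumerate_cons]
    simp only [pvFirstIdx]
    by_cases h : PySem.Str.isIn "#pragma hls_top" l = true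
    · -- the first pragma index is k; every later index is ≥ k + 1, so later pragma lines drop
      simp only [h, if_true, List.filter_cons, Bool.not_true,
        beq_self_eq_true, Bool.or_true]
      have hcongr : ((PySem.List.enumerate rest (k + 1)).filter
            (fun q => !PySem.Str.isIn "#pragma hls_top" q.2 || (some q.1 == some k)))
          = (PySem.List.enumerate rest (k + 1)).filter
            (fun q => !PySem.Str.isIn "#pragma hls_top" q.2) := by
        apply List.filter_congr
        intro q hq
        have hge := pvEnumerate_idx_ge rest (k + 1) q hq
        have hne : q.1 ≠ k := by omega
        simp [hne]
      rw [hcongr, List.map_cons, pvFilter_map_snd]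
      simp only [pvKeepFirst, h, if_true]
    · simp only [Bool.not_eq_true] at h
      simp only [h, Bool.false_eq_true, if_false, List.filter_cons, Bool.not_false,
        Bool.true_or, if_true, List.map_cons]
      rw [ih (k + 1)]
      simp only [pvKeepFirst, h, Bool.false_eq_true, if_false]

-- ===== VERDICT (by name: the statement is the Claim_ definition above) =====
theorem ensure_single_toppragma_py_spec : Claim_equal_ensure_single_toppragma_py := by
  intro code _
  unfold Spec_ensure_single_toppragma_py
  simp only [ensure_single_toppragma_py, ensure_single_toppragma_py_alt]
  rw [pvALoop_false _ [], List.nil_append, pvB_main]
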